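-- pv_equiv track=rewrite | github.com/RamananVr/Leetcodepython | greedy_algorithm/2178_Maximum_Split_of_Positive_Even_Integers.py | maximumEvenSplit
-- ===== SOURCE A (Python) =====
-- def maximumEvenSplit(finalSum: int) -> list[int]:
--     """
--     Function to split the given finalSum into a maximum number of unique positive even integers.
--     If it's not possible, return an empty list.
--     """
--     # If finalSum is odd, it's impossible to split into even integers
--     if finalSum % 2 != 0:
--         return []
--
--     result = []
--     current_even = 2
--
--     # Greedily add the smallest even numbers until we can't add more
--     while finalSum >= current_even:
--         result.append(current_even)
--         finalSum -= current_even
--         current_even += 2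
--
--     # If there's any remaining sum, add it to the last number in the result
--     if finalSum > 0:
--         result[-1] += finalSum
--
--     return result
-- ===== SOURCE B (Python) =====
-- def maximumEvenSplit(finalSum: int) -> list[int]:
--     """Split finalSum into a maximum number of distinct positive even integers.
--
--     Instead of greedily subtracting successive even numbers in a loop, compute the count k
--     directly: k is the largest integer with k*(k+1) <= finalSum (found by binary
--     search), the answer is the first k positive evens with the leftover added to
--     the last one.
--     """
--     if finalSum % 2 != 0 or finalSum <= 0:
--         return []
--     # largest k with k*(k+1) <= finalSum, by binary search
--     lo, hi = 0, finalSum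
--     while lo < hi:
--         mid = (lo + hi + 1) // 2
--         if mid * (mid + 1) <= finalSum:
--             lo = mid
--         else:
--             hi = mid - 1
--     k = lo
--     result = list(range(2, 2 * k + 2, 2))
--     remainder = finalSum - k * (k + 1)
--     if remainder > 0:
--         result[-1] += remainder
--     return result
-- ===== Notes on version B (the rewrite author's own statement) =====
-- stated objective: alternative
-- what changed: B replaces the greedy subtract-and-append while-loop of A by a closed characterisation: it binary-searches the largest k with k*(k+1) <= finalSum, emits the first k positive even numbers as a single range call, and adds the leftover finalSum - k*(k+1) to the last element.
import Mathlib
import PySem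

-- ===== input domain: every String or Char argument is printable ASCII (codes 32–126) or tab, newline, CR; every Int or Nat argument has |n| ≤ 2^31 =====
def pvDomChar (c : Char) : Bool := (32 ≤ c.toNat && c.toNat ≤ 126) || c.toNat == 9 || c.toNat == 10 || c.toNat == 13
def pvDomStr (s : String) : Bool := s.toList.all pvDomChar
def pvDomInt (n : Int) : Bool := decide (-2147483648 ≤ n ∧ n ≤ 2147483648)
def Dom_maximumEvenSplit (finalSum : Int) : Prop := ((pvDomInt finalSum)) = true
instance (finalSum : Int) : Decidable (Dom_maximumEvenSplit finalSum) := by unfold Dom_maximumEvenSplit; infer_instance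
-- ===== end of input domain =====

-- B derives the greedy cutoff k (largest k with k*(k+1) ≤ finalSum) by binary search and
-- builds the list as one range, instead of A's subtract-and-append while-loop; alternative
-- decomposition, same return value on every int.

-- ===== PORT A =====
-- result[-1] += v  (the [] case raises IndexError in Python; unreachable in A's control flow)
def pvBumpLast (l : List Int) (v : Int) : List Int :=
  match l with
  | [] => []
  | _ => l.dropLast ++ [l.getLast! + v]

-- the while-loop of A: state (finalSum, current_even, result); fuel only makes it total,
-- finalSum.toNat iterations are always enough (each pass subtracts current_even ≥ 2)
def pvLoopA : Nat → Int → Int → List Int → Int × List Int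
  | 0, s, _, acc => (s, acc)
  | f+1, s, c, acc => if c ≤ s then pvLoopA f (s - c) (c + 2) (acc ++ [c]) else (s, acc)

def maximumEvenSplit (finalSum : Int) : List Int :=
  if PySem.Int.mod finalSum 2 ≠ 0 then []
  else
    let p := pvLoopA finalSum.toNat finalSum 2 []
    if p.1 > 0 then pvBumpLast p.2 p.1 else p.2

-- ===== PORT B =====
-- the binary-search while-loop of Source B; fuel (hi-lo shrinks each pass) only makes it total
def pvBisect : Nat → Int → Int → Int → Int
  | 0, _, lo, _ => lo
  | f+1, n, lo, hi =>
    if lo < hi then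
      let mid := PySem.Int.floordiv (lo + hi + 1) 2
      if mid * (mid + 1) ≤ n then pvBisect f n mid hi
      else pvBisect f n lo (mid - 1)
    else lo

def maximumEvenSplit_alt (finalSum : Int) : List Int :=
  if PySem.Int.mod finalSum 2 ≠ 0 ∨ finalSum ≤ 0 then []
  else
    let k := pvBisect (finalSum.toNat + 1) finalSum 0 finalSum
    let result := PySem.List.pyRange 2 (2 * k + 2) 2
    let remainder := finalSum - k * (k + 1)
    if remainder > 0 then pvBumpLast result remainder else result

-- ===== PRECONDITION & SPEC =====
def Spec_maximumEvenSplit (finalSum : Int) (out : List Int) : Prop := out = maximumEvenSplit_alt finalSum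
instance (finalSum : Int) (out : List Int) : Decidable (Spec_maximumEvenSplit finalSum out) := by unfold Spec_maximumEvenSplit; infer_instance

-- ===== CLAIM (what is proved, stated in full; the proofs are below) =====
def Claim_equal_maximumEvenSplit : Prop := ∀ (finalSum : Int), Dom_maximumEvenSplit finalSum → Spec_maximumEvenSplit finalSum (maximumEvenSplit finalSum)

-- ===== LEMMAS AND PROOFS =====

-- A's loop, characterised: starting at step c with enough fuel, it runs exactly k passes
-- where k is pinned by the arithmetic bounds, returning the remainder and the appended evens.
lemma pvLoopA_run (k : Nat) : ∀ (f : Nat) (s c : Int) (acc : List Int),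
    2 ≤ c →
    (k : Int) * c + (k : Int) * ((k : Int) - 1) ≤ s →
    s < ((k : Int) + 1) * c + ((k : Int) + 1) * (k : Int) →
    s ≤ (f : Int) →
    pvLoopA f s c acc =
      (s - ((k : Int) * c + (k : Int) * ((k : Int) - 1)),
       acc ++ List.map (fun i : Nat => c + 2 * (i : Int)) (List.range k)) := by
  induction k with
  | zero =>
    intro f s c acc hc hlo hhi hf
    have hsc : ¬ c ≤ s := by push_cast at hhi; intro h; nlinarith
    cases f with
    | zero => simp [pvLoopA]
    | succ f => simp [pvLoopA, hsc]
  | succ k ih =>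
    intro f s c acc hc hlo hhi hf
    have hk : (0:Int) ≤ (k:Int) := by positivity
    have hsc : c ≤ s := by push_cast at hlo; nlinarith
    cases f with
    | zero =>
      exfalso
      have h2 : (2:Int) ≤ s := le_trans hc hsc
      simp at hf; omega
    | succ f =>
      have step := ih f (s - c) (c + 2) (acc ++ [c]) (by linarith)
        (by push_cast at hlo ⊢; nlinarith)
        (by push_cast at hhi ⊢; nlinarith)
        (by push_cast at hf ⊢; linarith)
      simp only [pvLoopA, if_pos hsc]
      rw [step, Prod.mk.injEq]
      constructor
      · push_cast; ring
      · rw [List.range_succ_eq_map, List.map_cons, List.map_map, List.append_assoc]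
        simp only [Nat.cast_zero, mul_zero, add_zero, List.singleton_append]
        congr 2
        apply List.map_congr_left
        intro i _
        simp only [Function.comp]
        push_cast
        ring

-- B's binary search, characterised: under the loop invariants it returns the unique
-- nonnegative r with r*(r+1) ≤ n < (r+1)*(r+2), and never goes below lo.
lemma pvBisect_spec : ∀ (f : Nat) (n lo hi : Int),
    lo ≤ hi → lo * (lo + 1) ≤ n → n < (hi + 1) * (hi + 2) → hi - lo ≤ (f : Int) →
    lo ≤ pvBisect f n lo hi ∧
    (pvBisect f n lo hi) * (pvBisect f n lo hi + 1) ≤ n ∧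
    n < (pvBisect f n lo hi + 1) * (pvBisect f n lo hi + 2) := by
  intro f
  induction f with
  | zero =>
    intro n lo hi hle hlo hhi hf
    have heq : lo = hi := by simp at hf; omega
    subst heq
    exact ⟨le_refl _, hlo, hhi⟩
  | succ f ih =>
    intro n lo hi hle hlo hhi hf
    by_cases h : lo < hi
    · have hmid : PySem.Int.floordiv (lo + hi + 1) 2 = (lo + hi + 1) / 2 :=
        PySem.Int.floordiv_eq_ediv_of_pos (by norm_num)
      have hb : lo < (lo + hi + 1) / 2 ∧ (lo + hi + 1) / 2 ≤ hi := by omega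
      simp only [pvBisect, if_pos h, hmid]
      by_cases hc : ((lo + hi + 1) / 2) * ((lo + hi + 1) / 2 + 1) ≤ n
      · rw [if_pos hc]
        have hrec := ih n ((lo + hi + 1) / 2) hi hb.2 hc hhi (by push_cast at hf ⊢; omega)
        exact ⟨by linarith [hrec.1], hrec.2⟩
      · rw [if_neg hc]
        push Not at hc
        have hhi' : n < ((lo + hi + 1) / 2 - 1 + 1) * ((lo + hi + 1) / 2 - 1 + 2) := by nlinarith
        exact ih n lo ((lo + hi + 1) / 2 - 1) (by omega) hlo hhi' (by push_cast at hf ⊢; omega)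
    · have heq : lo = hi := by omega
      subst heq
      simp only [pvBisect, if_neg h]
      exact ⟨le_refl _, hlo, hhi⟩

-- the step-2 range of Source B is the same list of evens A's loop appends
lemma pyRange_evens (k : Nat) :
    PySem.List.pyRange 2 (2 * (k : Int) + 2) 2 =
      List.map (fun i : Nat => 2 + 2 * (i : Int)) (List.range k) := by
  rw [PySem.List.pyRange_of_pos _ _ (by norm_num)]
  rcases Nat.eq_zero_or_pos k with h | h
  · subst h; norm_num
  · have h2 : (2:Int) < 2 * (k : Int) + 2 := by
      have h1 : (1:Int) ≤ (k:Int) := by exact_mod_cast h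
      linarith
    rw [if_pos h2]
    have hcnt : ((2 * (k : Int) + 2 - 2 + 2 - 1) / 2).toNat = k := by omega
    rw [hcnt]

lemma maximumEvenSplit_agree (n : Int) :
    maximumEvenSplit n = maximumEvenSplit_alt n := by
  by_cases hodd : PySem.Int.mod n 2 ≠ 0
  · have h1 : PySem.Int.mod n 2 = 1 := (PySem.Int.mod_two_eq n).resolve_left hodd
    have h2 : n % 2 = 1 := by
      rw [← PySem.Int.mod_eq_emod_of_pos (by norm_num : (0:Int) < 2)]; exact h1
    simp [maximumEvenSplit, maximumEvenSplit_alt, h2]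
  · push Not at hodd
    by_cases hpos : n ≤ 0
    · have ht : n.toNat = 0 := by omega
      simp [maximumEvenSplit, maximumEvenSplit_alt, hpos, ht, pvLoopA]
    · push Not at hpos
      have hbis := pvBisect_spec (n.toNat + 1) n 0 n (by omega) (by simpa using hpos.le)
        (by nlinarith) (by push_cast; omega)
      set r := pvBisect (n.toNat + 1) n 0 n with hr
      obtain ⟨hr0, hr1, hr2⟩ := hbis
      have hk : ((r.toNat : Int)) = r := Int.toNat_of_nonneg hr0
      have hloop := pvLoopA_run r.toNat n.toNat n 2 [] (le_refl 2)
        (by rw [hk]; nlinarith) (by rw [hk]; nlinarith) (by omega)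
      have hL : PySem.List.pyRange 2 (2 * r + 2) 2
          = List.map (fun i : Nat => 2 + 2 * (i : Int)) (List.range r.toNat) := by
        conv_lhs => rw [← hk]
        exact pyRange_evens r.toNat
      rw [hk] at hloop
      rw [show r * 2 + r * (r - 1) = r * (r + 1) from by ring] at hloop
      simp only [maximumEvenSplit, maximumEvenSplit_alt, hloop, ← hr, hL, hodd,
        ne_eq, not_true_eq_false, if_false, false_or, if_neg (not_le.mpr hpos),
        List.nil_append]

-- ===== VERDICT (by name: the statement is the Claim_ definition above) =====
theorem maximumEvenSplit_spec : Claim_equal_maximumEvenSplit := by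
  intro n _
  unfold Spec_maximumEvenSplit
  exact maximumEvenSplit_agree n
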